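-- pv_equiv track=rewrite | github.com/monk-time/algorithms | shbr5/b_largest_substring.py | find_max_good_substring_length
-- ===== SOURCE A (Python) =====
-- from collections import defaultdict
-- from itertools import chain, pairwise
--
-- def find_max_good_substring_length(s: str, min_count: int) -> int:
--     def rec(left: int, right: int):
--         counter = defaultdict(list)
--         for i in range(left, right + 1):
--             counter[s[i]].append(i)
--         split_points = sorted(
--             chain.from_iterable(
--                 lst for lst in counter.values() if len(lst) < min_count
--             )
--         )
--         if not split_points:
--             return right - left + 1
--         split_points = [left - 1, *split_points, right + 1]
--         return max(rec(a + 1, b - 1) for a, b in pairwise(split_points))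
--
--     return rec(0, len(s) - 1)
-- ===== SOURCE B (Python) =====
-- def find_max_good_substring_length(s: str, min_count: int) -> int:
--     # Brute force over all start positions: grow the window to the right,
--     # maintaining character counts, and record every window in which each
--     # present character occurs at least min_count times.
--     n = len(s)
--     best = 0
--     for i in range(n):
--         counts = {}
--         for j in range(i, n):
--             c = s[j]
--             counts[c] = counts.get(c, 0) + 1
--             if all(v >= min_count for v in counts.values()):
--                 best = max(best, j - i + 1)
--     return best
-- ===== Notes on version B (the rewrite author's own statement) =====
-- stated objective: simpler
-- what changed: Replaced the recursive divide-and-conquer on split points (grouping indices per character, sorting the rare-character positions, recursing between consecutive split points) by a plain two-nested-loops scan over all window start positions that grows each window rightward with an incremental character-count dict and records every window whose characters all reach min_count.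
import Mathlib
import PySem

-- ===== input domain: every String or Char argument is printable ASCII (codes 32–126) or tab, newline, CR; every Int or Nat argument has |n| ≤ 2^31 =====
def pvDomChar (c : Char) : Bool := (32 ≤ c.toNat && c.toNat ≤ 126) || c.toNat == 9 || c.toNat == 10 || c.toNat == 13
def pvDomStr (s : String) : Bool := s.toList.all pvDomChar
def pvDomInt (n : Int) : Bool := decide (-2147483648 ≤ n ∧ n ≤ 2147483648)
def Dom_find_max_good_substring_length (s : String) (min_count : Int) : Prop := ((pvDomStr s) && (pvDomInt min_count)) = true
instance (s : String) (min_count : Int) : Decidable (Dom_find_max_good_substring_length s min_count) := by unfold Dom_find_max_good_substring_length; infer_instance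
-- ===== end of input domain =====

-- B replaces A's recursive split-point divide-and-conquer by a plain quadratic
-- grow-the-window scan with an incremental character-count dict (objective: simpler; not faster).

-- ===== PORT A =====
-- s[i] : i is always in range when A executes, so the ' ' default is never used
def pvGetC (cs : List Char) (i : Int) : Char := (PySem.List.pyGet? cs i).getD ' '

-- rec(left, right); fuel only makes the recursion structural (it is never exhausted:
-- every recursive call strictly shrinks the interval, see pvRecA_fuel-style bounds in the proofs)
def pvRecA (cs : List Char) (m : Int) : Nat → Int → Int → Int
  | 0, _, _ => 0
  | fuel+1, left, right =>
    let counter : PySem.Dict Char (List Int) :=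
      (PySem.List.pyRange left (right+1) 1).foldl
        (fun d i => d.modify (pvGetC cs i) [] (fun lst => lst ++ [i])) PySem.Dict.empty
    let split_points : List Int :=
      PySem.List.sorted ((counter.values.filter (fun lst => (lst.length : Int) < m)).flatten) (fun x => x) false
    if split_points = [] then right - left + 1
    else
      let sp2 := (left - 1) :: (split_points ++ [right + 1])
      (PySem.List.max? ((sp2.zip sp2.tail).map (fun ab => pvRecA cs m fuel (ab.1 + 1) (ab.2 - 1))) (fun x => x)).getD 0

def find_max_good_substring_length (s : String) (min_count : Int) : Int :=
  pvRecA s.toList min_count (s.toList.length + 1) 0 ((s.toList.length : Int) - 1)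

-- ===== PORT B =====
def find_max_good_substring_length_alt (s : String) (min_count : Int) : Int :=
  let cs := s.toList
  (PySem.List.pyRange 0 cs.length 1).foldl (fun best i =>
    ((PySem.List.pyRange i cs.length 1).foldl
      (fun (p : Int × PySem.Dict Char Int) j =>
        let c := pvGetC cs j
        let counts := p.2.insert c (p.2.getD c 0 + 1)
        ((if counts.values.all (fun v => min_count ≤ v) then max p.1 (j - i + 1) else p.1), counts))
      (best, PySem.Dict.empty)).1) 0

-- ===== PRECONDITION & SPEC =====
def Spec_find_max_good_substring_length (s : String) (min_count : Int) (out : Int) : Prop := out = find_max_good_substring_length_alt s min_count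
instance (s : String) (min_count : Int) (out : Int) : Decidable (Spec_find_max_good_substring_length s min_count out) := by unfold Spec_find_max_good_substring_length; infer_instance

-- ===== CLAIM (what is proved, stated in full; the proofs are below) =====
def Claim_equal_find_max_good_substring_length : Prop := ∀ (s : String) (min_count : Int), Dom_find_max_good_substring_length s min_count → Spec_find_max_good_substring_length s min_count (find_max_good_substring_length s min_count)

-- ===== LEMMAS AND PROOFS =====

-- indices l..r (inclusive)
def pvIdxs (l r : Int) : List Int := PySem.List.pyRange l (r+1) 1
-- number of occurrences of character c among positions l..r
def pvCnt (cs : List Char) (l r : Int) (c : Char) : Nat :=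
  ((pvIdxs l r).filter (fun t => pvGetC cs t == c)).length
-- "the substring s[i..j] is good": each character present occurs ≥ m times in it
def pvGoodB (cs : List Char) (m : Int) (i j : Int) : Bool :=
  (pvIdxs i j).all (fun k => decide (m ≤ (pvCnt cs i j (pvGetC cs k) : Int)))
-- the canonical value: max length of a good subinterval of [l, r] (0 if none)
def pvM (cs : List Char) (m : Int) (l r : Int) : Int :=
  (pvIdxs l r).foldl (fun best i =>
    (pvIdxs i r).foldl (fun best j => if pvGoodB cs m i j then max best (j - i + 1) else best) best) 0
-- position i is a split point of [l, r]
def pvBadB (cs : List Char) (m : Int) (l r : Int) (i : Int) : Bool :=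
  decide ((pvCnt cs l r (pvGetC cs i) : Int) < m)

-- generic fold-with-max lemmas
theorem pv_foldl_mono_init {α : Type} (step : Int → α → Int)
    (h2 : ∀ a b b', b ≤ b' → step b a ≤ step b' a) (l : List α) :
    ∀ {b b' : Int}, b ≤ b' → l.foldl step b ≤ l.foldl step b' := by
  induction l with
  | nil => intro b b' h; simpa using h
  | cons x t ih => intro b b' h; exact ih (h2 x b b' h)

theorem pv_le_foldl_self {α : Type} (step : Int → α → Int)
    (hmono : ∀ b a, b ≤ step b a) (l : List α) (b : Int) : b ≤ l.foldl step b := by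
  induction l generalizing b with
  | nil => simp
  | cons x t ih => exact le_trans (hmono b x) (ih _)

theorem pv_foldl_le_bound {α : Type} (step : Int → α → Int) (l : List α) (B : Int) :
    ∀ b, b ≤ B → (∀ b a, a ∈ l → b ≤ B → step b a ≤ B) → l.foldl step b ≤ B := by
  induction l with
  | nil => intro b hb _; simpa using hb
  | cons x t ih =>
      intro b hb hstep
      exact ih _ (hstep b x (by simp) hb) (fun b a ha h => hstep b a (by simp [ha]) h)

theorem pv_le_foldl_of_mem {α : Type} (step : Int → α → Int)
    (_h2 : ∀ a b b', b ≤ b' → step b a ≤ step b' a)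
    (hmono : ∀ b a, b ≤ step b a) (l : List α) (x : α) (hx : x ∈ l) (v : Int)
    (hv : ∀ b, v ≤ step b x) (b : Int) : v ≤ l.foldl step b := by
  induction l generalizing b with
  | nil => cases hx
  | cons y t ih =>
      rcases List.mem_cons.mp hx with h | h
      · subst h
        exact le_trans (hv b) (pv_le_foldl_self step hmono t _)
      · exact ih h _

theorem pvM_nonneg (cs : List Char) (m : Int) (l r : Int) : 0 ≤ pvM cs m l r := by
  unfold pvM
  apply pv_le_foldl_self
  intro b i
  apply pv_le_foldl_self
  intro b' j
  dsimp only
  split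
  · exact le_max_left _ _
  · exact le_refl _

theorem pvM_ge (cs : List Char) (m : Int) (l r i j : Int)
    (hli : l ≤ i) (hij : i ≤ j) (hjr : j ≤ r) (hg : pvGoodB cs m i j = true) :
    j - i + 1 ≤ pvM cs m l r := by
  unfold pvM
  have histep_mono : ∀ (i0 : Int) (a b b' : Int), b ≤ b' →
      (if pvGoodB cs m i0 a then max b (a - i0 + 1) else b)
        ≤ (if pvGoodB cs m i0 a then max b' (a - i0 + 1) else b') := by
    intro i0 a b b' h
    split
    · exact max_le_max h (le_refl _)
    · exact h
  have histep_le : ∀ (i0 : Int) (b a : Int),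
      b ≤ (if pvGoodB cs m i0 a then max b (a - i0 + 1) else b) := by
    intro i0 b a; split
    · exact le_max_left _ _
    · exact le_refl _
  refine pv_le_foldl_of_mem _ ?_ ?_ _ i ?_ (j - i + 1) ?_ 0
  · intro a b b' h
    exact pv_foldl_mono_init _ (histep_mono a) _ h
  · intro b a
    exact pv_le_foldl_self _ (histep_le a) _ _
  · simp only [pvIdxs, PySem.List.mem_pyRange_one]; omega
  · intro b
    refine pv_le_foldl_of_mem _ (histep_mono i) (histep_le i) _ j ?_ (j - i + 1) ?_ b
    · simp only [pvIdxs, PySem.List.mem_pyRange_one]; omega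
    · intro b'
      rw [hg]
      simp only [if_true]
      exact le_max_right _ _

theorem pvM_le (cs : List Char) (m : Int) (l r B : Int) (hB : 0 ≤ B)
    (h : ∀ i j, l ≤ i → i ≤ j → j ≤ r → pvGoodB cs m i j = true → j - i + 1 ≤ B) :
    pvM cs m l r ≤ B := by
  unfold pvM
  refine pv_foldl_le_bound _ _ _ _ hB ?_
  intro b i hi hb
  have hi' : l ≤ i ∧ i < r + 1 := by simpa only [pvIdxs, PySem.List.mem_pyRange_one] using hi
  refine pv_foldl_le_bound _ _ _ _ hb ?_
  intro b' j hj hb'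
  have hj' : i ≤ j ∧ j < r + 1 := by simpa only [pvIdxs, PySem.List.mem_pyRange_one] using hj
  split
  · rename_i hg
    exact max_le hb' (h i j hi'.1 hj'.1 (by omega) hg)
  · exact hb'

theorem pvM_mono (cs : List Char) (m : Int) (l r l' r' : Int)
    (h1 : l ≤ l') (h2 : r' ≤ r) : pvM cs m l' r' ≤ pvM cs m l r := by
  apply pvM_le
  · exact pvM_nonneg cs m l r
  · intro i j hi hij hj hg
    exact pvM_ge cs m l r i j (by omega) hij (by omega) hg

theorem pvM_empty (cs : List Char) (m : Int) (l r : Int) (h : r < l) : pvM cs m l r = 0 := by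
  unfold pvM pvIdxs
  rw [PySem.List.pyRange_one_eq_nil (by omega)]
  rfl

-- the split-point list of A equals the filtered index range
theorem pv_splitPoints_eq (cs : List Char) (m : Int) (l r : Int) :
    PySem.List.sorted
      (((((PySem.List.pyRange l (r+1) 1).foldl
        (fun d i => d.modify (pvGetC cs i) [] (fun lst => lst ++ [i])) PySem.Dict.empty).values.filter
          (fun lst => (lst.length : Int) < m)).flatten)) (fun x => x) false
      = (pvIdxs l r).filter (pvBadB cs m l r) := by
  set idxs := PySem.List.pyRange l (r+1) 1 with hidxs
  set key := pvGetC cs with hkey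
  set counter := idxs.foldl (fun d i => d.modify (key i) [] (fun lst => lst ++ [i]))
    (PySem.Dict.empty : PySem.Dict Char (List Int)) with hcounter
  have hnodup_idxs : idxs.Nodup := by rw [hidxs]; exact PySem.List.nodup_pyRange_one l (r+1)
  have hnodup_keys : counter.keys.Nodup := by
    rw [hcounter]
    exact PySem.Dict.nodup_keys_foldl_modify_key idxs key [] _ _ (by simp)
  have hkeys : counter.keys = PySem.Set.ofList (idxs.map key) := by
    rw [hcounter, PySem.Dict.keys_foldl_modify_key]
    rfl
  have hmapfold : counter = (idxs.map (fun i => (key i, i))).foldl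
      (fun (d : PySem.Dict Char (List Int)) p => d.modify p.1 [] (fun lst => lst ++ [p.2]))
      PySem.Dict.empty := by rw [List.foldl_map]
  have hbucket : ∀ c : Char, counter.getD c [] = idxs.filter (fun i => key i == c) := by
    intro c
    rw [hmapfold, PySem.Dict.getD_foldl_modify_append, PySem.Dict.getD_empty,
      List.filter_map, List.map_map]
    simp [Function.comp_def]
  have hvalues : counter.values = (counter.keys).map (fun c => counter.getD c []) :=
    PySem.Dict.values_eq_map_keys counter hnodup_keys []
  have hbmem : ∀ (c : Char) (x : Int), x ∈ counter.getD c [] → x ∈ idxs ∧ key x = c := by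
    intro c x hx
    rw [hbucket] at hx
    have := List.mem_filter.mp hx
    exact ⟨this.1, by simpa using this.2⟩
  have hcnt : ∀ x : Int, (counter.getD (key x) []).length = pvCnt cs l r (key x) := by
    intro x
    rw [hbucket]
    rfl
  have hF : (counter.values.filter (fun lst => ((lst.length : Int) < m : Bool))).flatten
      = ((counter.keys.filter (fun c => (((counter.getD c []).length : Int) < m : Bool))).map
          (fun c => counter.getD c [])).flatten := by
    rw [hvalues, List.filter_map]
    rfl
  rw [hF]
  apply PySem.List.sorted_eq_of_perm_of_pairwise_lt
  · -- permutation
    have hnodupF : (((counter.keys.filter (fun c => (((counter.getD c []).length : Int) < m : Bool))).map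
          (fun c => counter.getD c [])).flatten).Nodup := by
      rw [List.nodup_flatten]
      constructor
      · intro s hs
        rcases List.mem_map.mp hs with ⟨c, _, rfl⟩
        rw [hbucket]
        exact List.Nodup.filter _ hnodup_idxs
      · rw [List.pairwise_map]
        apply List.Pairwise.filter
        have hne : counter.keys.Pairwise (· ≠ ·) := by
          rw [← List.nodup_iff_pairwise_ne]; exact hnodup_keys
        apply hne.imp
        intro a b hab x hxa hxb
        have h1 := (hbmem a x hxa).2
        have h2 := (hbmem b x hxb).2
        exact hab (h1 ▸ h2 ▸ rfl)
    refine (List.perm_ext_iff_of_nodup (List.Nodup.filter _ hnodup_idxs) hnodupF).mpr ?_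
    intro x
    rw [List.mem_filter, List.mem_flatten]
    constructor
    · rintro ⟨hx, hbad⟩
      refine ⟨counter.getD (key x) [], ?_, ?_⟩
      · apply List.mem_map_of_mem
        rw [List.mem_filter]
        constructor
        · rw [hkeys, PySem.Set.mem_ofList]
          exact List.mem_map_of_mem hx
        · rw [hcnt]
          unfold pvBadB at hbad
          simpa using hbad
      · rw [hbucket, List.mem_filter]
        exact ⟨hx, by simp⟩
    · rintro ⟨lst, hlst, hxl⟩
      rcases List.mem_map.mp hlst with ⟨c, hc, rfl⟩
      have hxi := hbmem c x hxl
      refine ⟨hxi.1, ?_⟩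
      rw [List.mem_filter] at hc
      unfold pvBadB
      rw [← hxi.2] at hc
      rw [hcnt] at hc
      simpa using hc.2
  · -- pairwise <
    have hpw : idxs.Pairwise (· < ·) := by
      rw [hidxs]; exact PySem.List.pairwise_lt_pyRange_one l (r+1)
    exact List.Pairwise.sublist List.filter_sublist hpw

theorem pv_cnt_mono (cs : List Char) (l r i j : Int) (c : Char)
    (h1 : l ≤ i) (h2 : i - 1 ≤ j) (h3 : j ≤ r) : pvCnt cs i j c ≤ pvCnt cs l r c := by
  unfold pvCnt pvIdxs
  rw [PySem.List.pyRange_one_append l i (r+1) h1 (by omega),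
      PySem.List.pyRange_one_append i (j+1) (r+1) (by omega) (by omega)]
  simp only [List.filter_append, List.length_append]
  omega

theorem pv_goodB_iff (cs : List Char) (m : Int) (i j : Int) :
    pvGoodB cs m i j = true ↔ ∀ k : Int, i ≤ k → k ≤ j → m ≤ (pvCnt cs i j (pvGetC cs k) : Int) := by
  unfold pvGoodB pvIdxs
  simp only [List.all_eq_true, PySem.List.mem_pyRange_one, decide_eq_true_eq]
  constructor
  · intro h k h1 h2; exact h k ⟨h1, by omega⟩
  · intro h k hk; exact h k hk.1 (by omega)

theorem pv_mem_zip_tail : ∀ (ys : List Int) (ab : Int × Int), ab ∈ ys.zip ys.tail →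
    ∃ pre mid, ys = pre ++ ab.1 :: ab.2 :: mid := by
  intro ys
  induction ys with
  | nil => intro ab h; simp at h
  | cons y t ih =>
      intro ab h
      cases t with
      | nil => simp at h
      | cons z t' =>
          rw [List.tail_cons, List.zip_cons_cons] at h
          rcases List.mem_cons.mp h with h | h
          · exact ⟨[], t', by subst h; rfl⟩
          · have h' : ab ∈ (z :: t').zip (z :: t').tail := by rw [List.tail_cons]; exact h
            rcases ih ab h' with ⟨pre, mid, hpm⟩
            exact ⟨y :: pre, mid, by rw [List.cons_append, hpm]⟩

theorem pv_snoc_mid : ∀ (u sp : List Int) (z x y : Int) (v : List Int),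
    sp ++ [z] = u ++ x :: y :: v → x ∈ sp := by
  intro u
  induction u with
  | nil =>
      intro sp z x y v h
      cases sp with
      | nil => simp at h
      | cons a sp' =>
          simp only [List.cons_append, List.nil_append, List.cons.injEq] at h
          exact h.1 ▸ List.mem_cons_self
  | cons q u' ih =>
      intro sp z x y v h
      cases sp with
      | nil =>
          have := congrArg List.length h
          simp at this
      | cons a sp' =>
          simp only [List.cons_append, List.cons.injEq] at h
          exact List.mem_cons_of_mem a (ih sp' z x y v h.2)

theorem pv_gap : ∀ (t : List Int) (y i j : Int), y < i →
    (∀ p ∈ t, p < i ∨ j < p) → (∃ b ∈ t, j < b) →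
    ∃ ab ∈ (y :: t).zip t, ab.1 < i ∧ j < ab.2 := by
  intro t
  induction t with
  | nil => intro y i j _ _ hex; simp at hex
  | cons z t' ih =>
      intro y i j hy hall hex
      by_cases hjz : j < z
      · exact ⟨(y, z), by simp [List.zip_cons_cons], hy, hjz⟩
      · have hz : z < i := by
          rcases hall z List.mem_cons_self with h | h
          · exact h
          · exact absurd h hjz
        have hex' : ∃ b ∈ t', j < b := by
          rcases hex with ⟨b, hb, hjb⟩
          rcases List.mem_cons.mp hb with rfl | hb'
          · exact absurd hjb hjz
          · exact ⟨b, hb', hjb⟩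
        rcases ih z i j hz (fun p hp => hall p (List.mem_cons_of_mem z hp)) hex' with ⟨ab, hab, h1, h2⟩
        exact ⟨ab, by rw [List.zip_cons_cons]; exact List.mem_cons_of_mem _ hab, h1, h2⟩

-- main characterisation of A's recursion
theorem pv_recA_eq (cs : List Char) (m : Int) :
    ∀ (fuel : Nat) (l r : Int), 0 ≤ l → r ≤ (cs.length : Int) - 1 → l - 1 ≤ r →
      (r - l + 1).toNat < fuel → pvRecA cs m fuel l r = pvM cs m l r := by
  intro fuel
  induction fuel with
  | zero => intro l r _ _ _ hf; omega
  | succ fuel ih =>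
    intro l r hl hr hlr hf
    simp only [pvRecA]
    rw [pv_splitPoints_eq]
    by_cases hsp : (pvIdxs l r).filter (pvBadB cs m l r) = []
    · rw [if_pos hsp]
      by_cases hre : r < l
      · rw [pvM_empty cs m l r hre]; omega
      · rw [not_lt] at hre
        apply le_antisymm
        · apply pvM_ge cs m l r l r (le_refl l) hre (le_refl r)
          rw [pv_goodB_iff]
          intro k hk1 hk2
          have hk : k ∈ pvIdxs l r := by
            unfold pvIdxs; rw [PySem.List.mem_pyRange_one]; omega
          have hnb : ¬ (pvBadB cs m l r k = true) := by
            intro hb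
            have : k ∈ (pvIdxs l r).filter (pvBadB cs m l r) := List.mem_filter.mpr ⟨hk, hb⟩
            rw [hsp] at this
            cases this
          unfold pvBadB at hnb
          simpa using hnb
        · apply pvM_le cs m l r (r - l + 1) (by omega)
          intro i j hi hij hj _
          omega
    · rw [if_neg hsp]
      set sp := (pvIdxs l r).filter (pvBadB cs m l r) with hspd
      have hspmem : ∀ p ∈ sp, (l ≤ p ∧ p ≤ r) ∧ (pvCnt cs l r (pvGetC cs p) : Int) < m := by
        intro p hp
        rw [hspd, List.mem_filter] at hp
        have h1 : l ≤ p ∧ p < r + 1 := by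
          have := hp.1
          unfold pvIdxs at this
          rwa [PySem.List.mem_pyRange_one] at this
        have h2 := hp.2
        unfold pvBadB at h2
        simp only [decide_eq_true_eq] at h2
        exact ⟨⟨h1.1, by omega⟩, h2⟩
      obtain ⟨s0, sp', hsplit⟩ : ∃ s0 sp', sp = s0 :: sp' := by
        cases h : sp with
        | nil => exact absurd h hsp
        | cons a b => exact ⟨a, b, rfl⟩
      have hlr' : l ≤ r := by
        have := (hspmem s0 (by rw [hsplit]; exact List.mem_cons_self)).1
        omega
      have hext_tail : ((l-1) :: (sp ++ [r+1])).tail = sp ++ [r+1] := List.tail_cons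
      -- bounds for every consecutive pair
      have hpw_ext : ((l-1) :: (sp ++ [r+1])).Pairwise (· < ·) := by
        rw [List.pairwise_cons]
        constructor
        · intro x hx
          rcases List.mem_append.mp hx with hx | hx
          · have := (hspmem x hx).1; omega
          · simp only [List.mem_singleton] at hx; omega
        · rw [List.pairwise_append]
          refine ⟨?_, by simp, ?_⟩
          · have hpwi : (pvIdxs l r).Pairwise (· < ·) := by
              unfold pvIdxs; exact PySem.List.pairwise_lt_pyRange_one l (r+1)
            rw [hspd]
            exact List.Pairwise.sublist List.filter_sublist hpwi
          · intro a ha b hb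
            simp only [List.mem_singleton] at hb
            have := (hspmem a ha).1
            omega
      have hzip_spec : ∀ ab ∈ ((l-1) :: (sp ++ [r+1])).zip (sp ++ [r+1]),
          l - 1 ≤ ab.1 ∧ ab.1 < ab.2 ∧ ab.2 ≤ r + 1 ∧ ab.2 - ab.1 - 1 ≤ r - l := by
        intro ab hab
        have hab' : ab ∈ ((l-1) :: (sp ++ [r+1])).zip ((l-1) :: (sp ++ [r+1])).tail := by
          rw [hext_tail]; exact hab
        rcases pv_mem_zip_tail _ ab hab' with ⟨pre, mid, hpm⟩
        have hmem_ext : ∀ x ∈ ((l-1) :: (sp ++ [r+1])), l - 1 ≤ x ∧ x ≤ r + 1 := by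
          intro x hx
          rcases List.mem_cons.mp hx with rfl | hx
          · omega
          · rcases List.mem_append.mp hx with hx | hx
            · have := (hspmem x hx).1; omega
            · simp only [List.mem_singleton] at hx; omega
        have hab1 : ab.1 ∈ ((l-1) :: (sp ++ [r+1])) := by
          rw [hpm]; exact List.mem_append.mpr (Or.inr (List.mem_cons_self))
        have hab2 : ab.2 ∈ ((l-1) :: (sp ++ [r+1])) := by
          rw [hpm]; exact List.mem_append.mpr (Or.inr (List.mem_cons_of_mem _ List.mem_cons_self))
        have hb1 := hmem_ext _ hab1
        have hb2 := hmem_ext _ hab2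
        have hlt : ab.1 < ab.2 := by
          have hinf : List.IsInfix [ab.1, ab.2] ((l-1) :: (sp ++ [r+1])) :=
            ⟨pre, mid, by rw [hpm]; simp⟩
          have hsub := hinf.sublist
          have := hpw_ext.sublist hsub
          simpa using this
        refine ⟨hb1.1, hlt, hb2.2, ?_⟩
        -- sharpened bound: the pair is never (l-1, r+1)
        cases pre with
        | nil =>
            simp only [List.nil_append, List.cons.injEq] at hpm
            have h2 : ab.2 = s0 := by
              have := hpm.2
              rw [hsplit] at this
              simp only [List.cons_append, List.cons.injEq] at this
              omega
            have := (hspmem s0 (by rw [hsplit]; exact List.mem_cons_self)).1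
            omega
        | cons q pre' =>
            simp only [List.cons_append, List.cons.injEq] at hpm
            have h1 : ab.1 ∈ sp := pv_snoc_mid pre' sp (r+1) ab.1 ab.2 mid hpm.2
            have := (hspmem _ h1).1
            omega
      -- the recursive calls compute pvM on their segments
      have hchild : ∀ ab ∈ ((l-1) :: (sp ++ [r+1])).zip (sp ++ [r+1]),
          pvRecA cs m fuel (ab.1+1) (ab.2-1) = pvM cs m (ab.1+1) (ab.2-1) := by
        intro ab hab
        rcases hzip_spec ab hab with ⟨h1, h2, h3, h4⟩
        exact ih (ab.1+1) (ab.2-1) (by omega) (by omega) (by omega) (by omega)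
      rw [hext_tail, List.map_congr_left hchild]
      -- evaluate the Python max over the (nonempty) list of child results
      rw [hsplit, List.cons_append, List.zip_cons_cons, List.map_cons, PySem.List.max?_id_cons]
      simp only [Option.getD_some]
      have hhead_mem : ((l-1), s0) ∈ ((l-1) :: (sp ++ [r+1])).zip (sp ++ [r+1]) := by
        rw [hsplit, List.cons_append, List.zip_cons_cons]
        exact List.mem_cons_self
      have hrest_mem : ∀ ab ∈ ((s0 :: (sp' ++ [r+1])).zip (sp' ++ [r+1])),
          ab ∈ ((l-1) :: (sp ++ [r+1])).zip (sp ++ [r+1]) := by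
        intro ab hab
        rw [hsplit, List.cons_append, List.zip_cons_cons]
        exact List.mem_cons_of_mem _ hab
      have hallpairs_le : ∀ ab ∈ ((l-1) :: (sp ++ [r+1])).zip (sp ++ [r+1]),
          pvM cs m (ab.1+1) (ab.2-1) ≤ pvM cs m l r := by
        intro ab hab
        rcases hzip_spec ab hab with ⟨h1, h2, h3, _⟩
        exact pvM_mono cs m l r (ab.1+1) (ab.2-1) (by omega) (by omega)
      apply le_antisymm
      · -- max of children ≤ pvM l r
        apply pv_foldl_le_bound _ _ _ _ (hallpairs_le _ hhead_mem)
        intro b a ha hb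
        rcases List.mem_map.mp ha with ⟨ab, hab, rfl⟩
        exact max_le hb (hallpairs_le ab (hrest_mem ab hab))
      · -- pvM l r ≤ max of children
        set B := (((s0 :: (sp' ++ [r+1])).zip (sp' ++ [r+1])).map
            (fun ab => pvM cs m (ab.1+1) (ab.2-1))).foldl max (pvM cs m (l-1+1) (s0-1)) with hBd
        have hmax_mono : ∀ (b : Int) (a : Int), b ≤ max b a := fun b a => le_max_left b a
        have hmax_mono2 : ∀ (a b b' : Int), b ≤ b' → max b a ≤ max b' a :=
          fun a b b' h => max_le_max h (le_refl a)
        have hval_le : ∀ ab ∈ ((l-1) :: (sp ++ [r+1])).zip (sp ++ [r+1]),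
            pvM cs m (ab.1+1) (ab.2-1) ≤ B := by
          intro ab hab
          rw [hsplit, List.cons_append, List.zip_cons_cons] at hab
          rcases List.mem_cons.mp hab with rfl | hab'
          · exact pv_le_foldl_self _ hmax_mono _ _
          · rw [hBd]
            exact pv_le_foldl_of_mem _ hmax_mono2 hmax_mono _
              (pvM cs m (ab.1+1) (ab.2-1))
              (List.mem_map_of_mem (f := fun ab => pvM cs m (ab.1+1) (ab.2-1)) hab')
              (pvM cs m (ab.1+1) (ab.2-1)) (fun b => le_max_right _ _) _
        apply pvM_le
        · exact le_trans (pvM_nonneg cs m (l-1+1) (s0-1)) (pv_le_foldl_self _ hmax_mono _ _)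
        · intro i j hi hij hj hg
          have hgap : ∃ ab ∈ ((l-1) :: (sp ++ [r+1])).zip (sp ++ [r+1]), ab.1 < i ∧ j < ab.2 := by
            apply pv_gap (sp ++ [r+1]) (l-1) i j (by omega)
            · intro p hp
              rcases List.mem_append.mp hp with hp | hp
              · by_contra hcon
                rw [not_or, not_lt, not_lt] at hcon
                have hpi : i ≤ p := by omega
                have hpj : p ≤ j := by omega
                have hgood := (pv_goodB_iff cs m i j).mp hg p hpi hpj
                have hmono := pv_cnt_mono cs l r i j (pvGetC cs p) hi (by omega) hj
                have hbadp := (hspmem p hp).2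
                omega
              · simp only [List.mem_singleton] at hp
                right; omega
            · exact ⟨r+1, List.mem_append.mpr (Or.inr List.mem_cons_self), by omega⟩
          rcases hgap with ⟨ab, hab, hlt1, hlt2⟩
          have : j - i + 1 ≤ pvM cs m (ab.1+1) (ab.2-1) :=
            pvM_ge cs m (ab.1+1) (ab.2-1) i j (by omega) hij (by omega) hg
          exact le_trans this (hval_le ab hab)

-- the characters at positions i..j
def pvChars (cs : List Char) (i j : Int) : List Char := (pvIdxs i j).map (pvGetC cs)

theorem pv_counts_all (cs : List Char) (m : Int) (i j : Int) :
    ((((pvChars cs i j).foldl (fun d c => d.insert c (d.getD c 0 + 1))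
        PySem.Dict.empty).values).all (fun v => m ≤ v)) = pvGoodB cs m i j := by
  rw [PySem.Dict.foldl_insert_getD_add_one_eq_counter]
  rw [PySem.Dict.values_eq_map_keys _ (PySem.Dict.nodup_keys_counter _) 0]
  rw [PySem.Dict.keys_counter]
  simp only [List.all_map, Function.comp_def, PySem.Dict.getD_counter]
  unfold pvGoodB
  rw [Bool.eq_iff_iff]
  simp only [List.all_eq_true, decide_eq_true_eq]
  have hcount : ∀ c : Char, (List.count c (pvChars cs i j)) = ((pvIdxs i j).filter (fun t => pvGetC cs t == c)).length := by
    intro c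
    unfold pvChars
    rw [List.count_eq_countP, List.countP_map, List.countP_eq_length_filter]
    rfl
  constructor
  · intro h k hk
    have hc : pvGetC cs k ∈ PySem.Set.ofList (pvChars cs i j) := by
      rw [PySem.Set.mem_ofList]
      exact List.mem_map_of_mem hk
    have := h _ hc
    rw [hcount] at this
    unfold pvCnt
    exact this
  · intro h c hc
    rw [PySem.Set.mem_ofList] at hc
    unfold pvChars at hc
    rcases List.mem_map.mp hc with ⟨k, hk, hke⟩
    have := h k hk
    rw [hcount]
    unfold pvCnt at this
    subst hke
    exact this

theorem pv_inner (cs : List Char) (m : Int) (i : Int) (n : Nat) :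
    ∀ b : Int,
    ((PySem.List.pyRange i (i + (n : Int)) 1).foldl
      (fun (p : Int × PySem.Dict Char Int) j =>
        ((if ((p.2.insert (pvGetC cs j) (p.2.getD (pvGetC cs j) 0 + 1)).values.all
              (fun v => m ≤ v)) then max p.1 (j - i + 1) else p.1),
          p.2.insert (pvGetC cs j) (p.2.getD (pvGetC cs j) 0 + 1)))
      (b, PySem.Dict.empty))
    = ((PySem.List.pyRange i (i + (n : Int)) 1).foldl
        (fun best j => if pvGoodB cs m i j then max best (j - i + 1) else best) b,
       (PySem.List.pyRange i (i + (n : Int)) 1).foldl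
        (fun d k => d.insert (pvGetC cs k) (d.getD (pvGetC cs k) 0 + 1)) PySem.Dict.empty) := by
  induction n with
  | zero =>
      intro b
      rw [show i + ((0 : Nat) : Int) = i by omega, PySem.List.pyRange_one_eq_nil (le_refl i)]
      rfl
  | succ n ih =>
      intro b
      have hsplit : PySem.List.pyRange i (i + ((n + 1 : Nat) : Int)) 1
          = PySem.List.pyRange i (i + (n : Int)) 1 ++ [i + (n : Int)] := by
        rw [show i + ((n + 1 : Nat) : Int) = (i + (n : Int)) + 1 by push_cast; ring]
        exact PySem.List.pyRange_one_succ_right (by omega)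
      rw [hsplit]
      rw [List.foldl_append, List.foldl_append, List.foldl_append, ih b]
      simp only [List.foldl_cons, List.foldl_nil]
      congr 1
      have hDicts : ∀ K : Int,
          ((PySem.List.pyRange i K 1).foldl
            (fun d k => d.insert (pvGetC cs k) (d.getD (pvGetC cs k) 0 + 1)) PySem.Dict.empty)
          = (pvChars cs i (K - 1)).foldl (fun d c => d.insert c (d.getD c 0 + 1)) (PySem.Dict.empty : PySem.Dict Char Int) := by
        intro K
        unfold pvChars pvIdxs
        rw [show K - 1 + 1 = K by ring, List.foldl_map]
      have hD := hDicts (i + (n:Int) + 1)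
      rw [show i + (n:Int) + 1 - 1 = i + (n:Int) by ring] at hD
      have htest := pv_counts_all cs m i (i + (n : Int))
      rw [← hD] at htest
      have hstep : PySem.List.pyRange i (i + (n:Int) + 1) 1
          = PySem.List.pyRange i (i + (n:Int)) 1 ++ [i + (n:Int)] :=
        PySem.List.pyRange_one_succ_right (by omega)
      rw [hstep, List.foldl_append, List.foldl_cons, List.foldl_nil] at htest
      rw [htest]

theorem pv_alt_eq (s : String) (m : Int) :
    find_max_good_substring_length_alt s m = pvM s.toList m 0 ((s.toList.length : Int) - 1) := by
  unfold find_max_good_substring_length_alt pvM pvIdxs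
  rw [show (s.toList.length : Int) - 1 + 1 = (s.toList.length : Int) by ring]
  apply PySem.List.foldl_congr_mem
  intro b i hi
  have hi' : 0 ≤ i ∧ i < (s.toList.length : Int) := by
    simpa only [PySem.List.mem_pyRange_one] using hi
  have hn : (s.toList.length : Int) = i + ((s.toList.length - i.toNat : Nat) : Int) := by omega
  rw [hn]
  rw [pv_inner s.toList m i (s.toList.length - i.toNat) b]

-- ===== VERDICT (by name: the statement is the Claim_ definition above) =====
theorem find_max_good_substring_length_spec : Claim_equal_find_max_good_substring_length := by
  intro s m _
  unfold Spec_find_max_good_substring_length find_max_good_substring_length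
  rw [pv_alt_eq]
  apply pv_recA_eq
  · exact le_refl 0
  · omega
  · omega
  · omega
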